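-- pv_equiv track=rewrite | github.com/SeungAh-Hong/algorithm | 프로그래머스/unrated/138476. 귤 고르기/귤 고르기.py | solution
-- ===== SOURCE A (Python) =====
-- from collections import Counter
--
-- def solution(k, tangerine):
--     answer = 0
--     count = Counter(tangerine)
--     sorted_count = count.most_common()
--     for gram, cnt in sorted_count:
--         if k > 0:
--             k -= cnt
--             answer += 1
--
--     return answer
-- ===== SOURCE B (Python) =====
-- def solution(k, tangerine):
--     counts = {}
--     for t in tangerine:
--         counts[t] = counts.get(t, 0) + 1
--     n = len(tangerine)
--     buckets = [0] * (n + 1)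
--     for c in counts.values():
--         buckets[c] += 1
--     answer = 0
--     for c in range(n, 0, -1):
--         for _ in range(buckets[c]):
--             if k > 0:
--                 k -= c
--                 answer += 1
--     return answer
-- ===== Notes on version B (the rewrite author's own statement) =====
-- stated objective: alternative
-- what changed: B replaces A's comparison sort of the frequency table (Counter.most_common) by a counting/bucket sort of the frequencies, which are bounded by len(tangerine), and runs the same greedy scan over the buckets in descending size order.
import Mathlib
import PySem

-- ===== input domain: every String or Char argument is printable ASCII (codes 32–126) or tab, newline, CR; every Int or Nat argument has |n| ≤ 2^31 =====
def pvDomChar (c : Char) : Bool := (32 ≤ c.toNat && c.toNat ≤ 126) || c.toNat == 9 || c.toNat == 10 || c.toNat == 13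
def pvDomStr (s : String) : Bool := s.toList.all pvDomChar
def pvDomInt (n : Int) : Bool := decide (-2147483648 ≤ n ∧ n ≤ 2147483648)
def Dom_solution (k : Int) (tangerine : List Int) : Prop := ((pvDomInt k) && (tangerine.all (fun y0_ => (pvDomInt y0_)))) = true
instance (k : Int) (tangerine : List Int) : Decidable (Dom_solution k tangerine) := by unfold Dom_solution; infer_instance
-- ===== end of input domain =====

-- B replaces A's comparison sort of the frequency table (Counter.most_common) by a
-- counting/bucket sort of the frequencies (bounded by len(tangerine)), keeping the same greedy scan.

-- ===== PORT A =====
def solution (k : Int) (tangerine : List Int) : Int :=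
  let count := PySem.Dict.counter tangerine
  let sorted_count := PySem.List.sorted count.items (fun p => p.2) true
  let r := sorted_count.foldl (fun s p => if s.1 > 0 then (s.1 - p.2, s.2 + 1) else s) (k, 0)
  r.2

-- ===== PORT B =====
def solution_alt (k : Int) (tangerine : List Int) : Int :=
  let counts := tangerine.foldl (fun d t => d.insert t (d.getD t 0 + 1)) PySem.Dict.empty
  let n := PySem.List.len tangerine
  let buckets := counts.values.foldl
    (fun b c => PySem.List.pySetD b c (PySem.List.pyGetD b c 0 + 1))
    (PySem.List.pyRepeat [0] (n + 1))
  let r := (PySem.List.pyRange n 0 (-1)).foldl (fun s c =>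
      (PySem.List.pyRange 0 (PySem.List.pyGetD buckets c 0) 1).foldl
        (fun s _ => if s.1 > 0 then (s.1 - c, s.2 + 1) else s) s) (k, 0)
  r.2

-- ===== PRECONDITION & SPEC =====
def Spec_solution (k : Int) (tangerine : List Int) (out : Int) : Prop := out = solution_alt k tangerine
instance (k : Int) (tangerine : List Int) (out : Int) : Decidable (Spec_solution k tangerine out) := by unfold Spec_solution; infer_instance

-- ===== CLAIM (what is proved, stated in full; the proofs are below) =====
def Claim_equal_solution : Prop := ∀ (k : Int) (tangerine : List Int), Dom_solution k tangerine → Spec_solution k tangerine (solution k tangerine)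

-- ===== LEMMAS AND PROOFS =====

-- the greedy step shared by both loops (proof-side name only; the ports spell it out)
def pvStep (s : Int × Int) (c : Int) : Int × Int := if s.1 > 0 then (s.1 - c, s.2 + 1) else s

-- a loop ignoring its iterator is a fold over a replicate
theorem pvFoldl_const {α : Type} (c : Int) (l : List α) (s : Int × Int) :
    l.foldl (fun s _ => pvStep s c) s = (List.replicate l.length c).foldl pvStep s := by
  induction l generalizing s with
  | nil => rfl
  | cons x xs ih => simpa [List.replicate_succ] using ih (pvStep s c)

-- nested greedy loops are one fold over the flattened list
theorem pvFoldl_nested (cs : List Int) (rep : Int → List Int) (s : Int × Int) :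
    cs.foldl (fun s c => (rep c).foldl pvStep s) s = (cs.flatMap rep).foldl pvStep s := by
  induction cs generalizing s with
  | nil => rfl
  | cons c cs ih => simp [List.flatMap_cons, List.foldl_append, ih]

theorem pvLength_pyRange_zero (m : Int) : (PySem.List.pyRange 0 m 1).length = m.toNat := by
  rw [PySem.List.pyRange_of_pos 0 m (by omega)]
  by_cases h : 0 < m
  · simp only [if_pos h, List.length_map, List.length_range]
    omega
  · simp only [if_neg h, List.length_map, List.length_range]
    omega

-- the bucket-filling loop counts occurrences
theorem pvBucket_getD (l : List Int) : ∀ (b0 : List Int),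
    (∀ v ∈ l, 0 ≤ v ∧ v < (b0.length : Int)) → ∀ (j : Int), 0 ≤ j → j < (b0.length : Int) →
    PySem.List.pyGetD
      (l.foldl (fun b c => PySem.List.pySetD b c (PySem.List.pyGetD b c 0 + 1)) b0) j 0
      = PySem.List.pyGetD b0 j 0 + (l.count j : Int) := by
  induction l with
  | nil => intro b0 _ j h0 h1; simp
  | cons v l ih =>
      intro b0 hl j h0 h1
      have hv := hl v (List.mem_cons_self)
      have hlen : (PySem.List.pySetD b0 v (PySem.List.pyGetD b0 v 0 + 1)).length = b0.length :=
        PySem.List.length_pySetD _ _ _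
      rw [List.foldl_cons, ih _ (by rw [hlen]; exact fun x hx => hl x (List.mem_cons_of_mem _ hx)) j h0 (by rw [hlen]; exact h1)]
      rw [PySem.List.pySetD_of_nonneg _ _ hv.1,
        PySem.List.pyGetD_eq_getElem _ _ h0 (by simpa using h1),
        PySem.List.pyGetD_eq_getElem _ _ h0 h1,
        PySem.List.pyGetD_eq_getElem _ _ hv.1 hv.2,
        List.getElem_set]
      by_cases hjv : v = j
      · subst hjv; simp; omega
      · have : ¬ (v.toNat = j.toNat) := by omega
        simp [this, hjv]

-- counting elements of a flatMap of replicates over distinct heads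
theorem pvCount_flatMap_rep (cs : List Int) (m : Int → Nat) (hnd : cs.Nodup) (j : Int) :
    (cs.flatMap (fun c => List.replicate (m c) c)).count j = if j ∈ cs then m j else 0 := by
  induction cs with
  | nil => simp
  | cons c cs ih =>
      simp only [List.flatMap_cons, List.count_append, List.count_replicate,
        ih (List.nodup_cons.mp hnd).2, List.mem_cons]
      by_cases hcj : c = j
      · subst hcj
        have : c ∉ cs := (List.nodup_cons.mp hnd).1
        simp [this]
      · simp [hcj, Ne.symm hcj]

-- a flatMap of replicates over a strictly descending list is descending
theorem pvPairwise_flatMap_rep (cs : List Int) (m : Int → Nat)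
    (h : cs.Pairwise (fun a b => b < a)) :
    (cs.flatMap (fun c => List.replicate (m c) c)).Pairwise (fun a b => b ≤ a) := by
  induction cs with
  | nil => simp
  | cons c cs ih =>
      simp only [List.flatMap_cons, List.pairwise_append]
      refine ⟨List.pairwise_replicate.mpr (Or.inr le_rfl), ih h.of_cons, ?_⟩
      intro a ha b hb
      have ha' : a = c := List.eq_of_mem_replicate ha
      obtain ⟨c', hc', hb'⟩ := List.mem_flatMap.mp hb
      have hb'' : b = c' := List.eq_of_mem_replicate hb'
      have := (List.pairwise_cons.mp h).1 c' hc'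
      omega

-- the descending range: range(n, 0, -1) over a natural n
theorem pvPyRange_desc (N : Nat) :
    PySem.List.pyRange (N : Int) 0 (-1) = (List.range N).map (fun (i : Nat) => (N : Int) - (i : Int)) := by
  rw [PySem.List.pyRange_of_neg _ _ (by omega : (-1:Int) < 0)]
  rcases Nat.eq_zero_or_pos N with hN | hN
  · subst hN; simp
  · have hcond : (0:Int) < N := by exact_mod_cast hN
    rw [if_pos hcond]
    have h2 : ((N:Int) - 0 + -(-1) - 1) / -(-1) = (N:Int) := by norm_num
    rw [h2, Int.toNat_natCast]
    refine List.map_congr_left (fun i _ => ?_)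
    ring

-- proof-side names for the intermediate data of the two programs
def pvV (t : List Int) : List Int := (PySem.Dict.counter t).values

def pvBuckets (t : List Int) : List Int :=
  (pvV t).foldl (fun b c => PySem.List.pySetD b c (PySem.List.pyGetD b c 0 + 1))
    (List.replicate (t.length + 1) 0)

def pvCs (t : List Int) : List Int :=
  (List.range t.length).map (fun (i : Nat) => (t.length : Int) - (i : Int))

def pvM (t : List Int) (c : Int) : Nat := (PySem.List.pyGetD (pvBuckets t) c 0).toNat

def pvLB (t : List Int) : List Int := (pvCs t).flatMap (fun c => List.replicate (pvM t c) c)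

def pvSA (t : List Int) : List (Int × Int) :=
  PySem.List.sorted (PySem.Dict.counter t).items (fun p => p.2) true

theorem pvVel (t : List Int) : ∀ v ∈ pvV t, 1 ≤ v ∧ v ≤ (t.length : Int) := by
  intro v hv
  have hv' : v ∈ (PySem.Set.ofList t).map (fun x => (t.count x : Int)) := by
    have hit := PySem.Dict.items_counter t
    simpa [pvV, PySem.Dict.values, hit, List.map_map, Function.comp] using hv
  obtain ⟨x, hx, rfl⟩ := List.mem_map.mp hv'
  have hxt : x ∈ t := (PySem.Set.mem_ofList t x).mp hx
  have h1 : 0 < t.count x := List.count_pos_iff.mpr hxt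
  have h2 : t.count x ≤ t.length := List.count_le_length
  omega

theorem pvBuckets_getD (t : List Int) (j : Int) (h0 : 0 ≤ j) (h1 : j < (t.length : Int) + 1) :
    PySem.List.pyGetD (pvBuckets t) j 0 = ((pvV t).count j : Int) := by
  unfold pvBuckets
  rw [pvBucket_getD (pvV t) (List.replicate (t.length + 1) 0)
      (by intro v hv
          have := pvVel t v hv
          simp only [List.length_replicate]
          constructor <;> [omega; (push_cast; omega)])
      j h0 (by simp; omega)]
  rw [PySem.List.pyGetD_eq_getElem _ _ h0 (by simp; omega), List.getElem_replicate]
  omega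

theorem pvCs_mem (t : List Int) (j : Int) : j ∈ pvCs t ↔ 1 ≤ j ∧ j ≤ (t.length : Int) := by
  unfold pvCs
  simp only [List.mem_map, List.mem_range]
  constructor
  · rintro ⟨i, hi, rfl⟩; omega
  · rintro ⟨h1, h2⟩
    exact ⟨((t.length : Int) - j).toNat, by omega, by omega⟩

theorem pvCs_nodup (t : List Int) : (pvCs t).Nodup :=
  (List.nodup_range).map (fun a b h => by omega)

theorem pvCs_pairwise (t : List Int) : (pvCs t).Pairwise (fun a b => b < a) :=
  List.pairwise_map.mpr (List.pairwise_lt_range.imp (fun h => by omega))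

theorem pvLB_count (t : List Int) (j : Int) : (pvLB t).count j = (pvV t).count j := by
  unfold pvLB
  rw [pvCount_flatMap_rep _ _ (pvCs_nodup t) j]
  by_cases hj : j ∈ pvCs t
  · obtain ⟨h1, h2⟩ := (pvCs_mem t j).mp hj
    rw [if_pos hj]
    unfold pvM
    rw [pvBuckets_getD t j (by omega) (by omega), Int.toNat_natCast]
  · rw [if_neg hj]
    symm
    rw [List.count_eq_zero]
    intro hmem
    exact hj ((pvCs_mem t j).mpr (pvVel t j hmem))

theorem pvMain (k : Int) (tangerine : List Int) : solution k tangerine = solution_alt k tangerine := by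
  -- A's loop is a fold of pvStep over the multiset of frequencies sorted descending
  have hA : solution k tangerine = (((pvSA tangerine).map (fun p => p.2)).foldl pvStep (k, 0)).2 := by
    rw [List.foldl_map]; rfl
  -- B's nested loops are a fold of pvStep over the bucket-ordered list pvLB
  have hrep : PySem.List.pyRepeat [(0:Int)] ((tangerine.length : Int) + 1)
      = List.replicate (tangerine.length + 1) 0 := by
    rw [PySem.List.pyRepeat_singleton]; norm_num
  have e1 : solution_alt k tangerine =
      ((PySem.List.pyRange (tangerine.length : Int) 0 (-1)).foldl (fun s c =>
        (PySem.List.pyRange 0 (PySem.List.pyGetD (pvBuckets tangerine) c 0) 1).foldl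
          (fun s _ => pvStep s c) s) (k, 0)).2 := by
    rw [show solution_alt k tangerine =
        ((PySem.List.pyRange (tangerine.length : Int) 0 (-1)).foldl (fun s c =>
          (PySem.List.pyRange 0 (PySem.List.pyGetD ((pvV tangerine).foldl
              (fun b c => PySem.List.pySetD b c (PySem.List.pyGetD b c 0 + 1))
              (PySem.List.pyRepeat [0] ((tangerine.length : Int) + 1))) c 0) 1).foldl
            (fun s _ => pvStep s c) s) (k, 0)).2 from rfl, hrep]
    rfl
  have hfun : (fun (s : Int × Int) (c : Int) =>
        (PySem.List.pyRange 0 (PySem.List.pyGetD (pvBuckets tangerine) c 0) 1).foldl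
          (fun s _ => pvStep s c) s)
      = fun s c => (List.replicate (pvM tangerine c) c).foldl pvStep s := by
    funext s c
    rw [pvFoldl_const, pvLength_pyRange_zero]
    rfl
  have hB : solution_alt k tangerine = ((pvLB tangerine).foldl pvStep (k, 0)).2 := by
    rw [e1, pvPyRange_desc tangerine.length, hfun]
    rw [pvFoldl_nested]
    rfl
  -- the two frequency lists are descending rearrangements of the same multiset, hence equal
  have hperm : ((pvSA tangerine).map (fun p => p.2)).Perm (pvLB tangerine) := by
    have h1 : ((pvSA tangerine).map (fun p => p.2)).Perm (pvV tangerine) :=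
      (PySem.List.sorted_perm (PySem.Dict.counter tangerine).items (fun p => p.2) true).map _
    have h2 : (pvLB tangerine).Perm (pvV tangerine) :=
      List.perm_iff_count.mpr (pvLB_count tangerine)
    exact h1.trans h2.symm
  have hpa : ((pvSA tangerine).map (fun p => p.2)).Pairwise (fun a b => b ≤ a) :=
    List.pairwise_map.mpr (PySem.List.sorted_pairwise_rev _ _)
  have hpb : (pvLB tangerine).Pairwise (fun a b => b ≤ a) :=
    pvPairwise_flatMap_rep _ _ (pvCs_pairwise tangerine)
  have heq : (pvSA tangerine).map (fun p => p.2) = pvLB tangerine :=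
    List.Perm.eq_of_pairwise (fun a b _ _ h1 h2 => le_antisymm h2 h1) hpa hpb hperm
  rw [hA, heq, hB]

-- ===== VERDICT (by name: the statement is the Claim_ definition above) =====
theorem solution_spec : Claim_equal_solution := by
  intro k tangerine _
  unfold Spec_solution
  exact pvMain k tangerine
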